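-- pv_equiv track=rewrite | github.com/MrBrantCode/unitest_baseline | mut_generate/mist_train_cf/cf_15308/solution.py | sort_unique_descending
-- ===== SOURCE A (Python) =====
-- def sort_unique_descending(lst):
--     if len(lst) <= 1:
--         return lst
--
--     mid = len(lst) // 2
--     left = lst[:mid]
--     right = lst[mid:]
--
--     left_sorted = sort_unique_descending(left)
--     right_sorted = sort_unique_descending(right)
--
--     sorted_lst = merge(left_sorted, right_sorted)
--     unique_lst = remove_duplicates(sorted_lst)
--
--     return unique_lst
--
-- def merge(left, right):
--     merged = []
--     i = j = 0
--
--     while i < len(left) and j < len(right):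
--         if left[i] > right[j]:
--             merged.append(left[i])
--             i += 1
--         else:
--             merged.append(right[j])
--             j += 1
--
--     merged.extend(left[i:])
--     merged.extend(right[j:])
--
--     return merged
--
-- def remove_duplicates(lst):
--     unique_lst = []
--
--     last_seen = None
--     for num in lst:
--         if num != last_seen:
--             unique_lst.append(num)
--         last_seen = num
--
--     return unique_lst
-- ===== SOURCE B (Python) =====
-- def sort_unique_descending(lst):
--     return sorted(set(lst), reverse=True)
-- ===== Notes on version B (the rewrite author's own statement) =====
-- stated objective: faster
-- what changed: Replaces the hand-written recursive merge-sort with per-level adjacent deduplication by a one-liner: build a set of the elements and sort it descending with the built-in sort.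
import Mathlib
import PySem

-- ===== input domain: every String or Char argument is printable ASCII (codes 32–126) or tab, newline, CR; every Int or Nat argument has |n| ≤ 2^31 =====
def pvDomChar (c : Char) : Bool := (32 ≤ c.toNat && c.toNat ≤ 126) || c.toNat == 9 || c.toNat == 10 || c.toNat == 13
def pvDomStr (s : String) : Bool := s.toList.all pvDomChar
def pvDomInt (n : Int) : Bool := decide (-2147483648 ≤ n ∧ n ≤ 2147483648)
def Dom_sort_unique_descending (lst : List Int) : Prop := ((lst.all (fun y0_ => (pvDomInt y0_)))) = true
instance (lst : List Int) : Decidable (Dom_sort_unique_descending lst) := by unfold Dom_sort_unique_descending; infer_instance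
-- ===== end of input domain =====

-- B replaces A's recursive merge-sort with per-level adjacent dedup by a one-liner:
-- sort the set of elements descending with the built-in sort (simpler, no recursion).

-- ===== PORT A =====
-- merge(left, right): the index-based while loop is transcribed as structural
-- recursion on the two lists (i/j advance = dropping the consumed head); the
-- trailing extends are the [], l base cases.
def mergeA : List Int → List Int → List Int
  | [], r => r
  | a :: l, [] => a :: l
  | a :: l, b :: r => if a > b then a :: mergeA l (b :: r) else b :: mergeA (a :: l) r

-- remove_duplicates: the for loop with its last_seen accumulator (None → Option.none;
-- 'num != last_seen' is True when last_seen is None, int-vs-int inequality otherwise).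
def removeDupAux (last : Option Int) : List Int → List Int
  | [] => []
  | n :: rest =>
      if (match last with | none => true | some m => n ≠ m) then
        n :: removeDupAux (some n) rest
      else
        removeDupAux (some n) rest

def removeDuplicatesA (lst : List Int) : List Int := removeDupAux none lst

-- sort_unique_descending: lst[:mid] / lst[mid:] with 0 ≤ mid ≤ len are exactly take/drop.
def sort_unique_descending (lst : List Int) : List Int :=
  if h : lst.length ≤ 1 then lst
  else
    let mid := lst.length / 2
    let left := lst.take mid
    let right := lst.drop mid
    let left_sorted := sort_unique_descending left
    let right_sorted := sort_unique_descending right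
    removeDuplicatesA (mergeA left_sorted right_sorted)
termination_by lst.length
decreasing_by
  · simp only [List.length_take]; omega
  · simp only [List.length_drop]; omega

-- ===== PORT B =====
-- sorted(set(lst), reverse=True)
def sort_unique_descending_alt (lst : List Int) : List Int :=
  PySem.List.sorted (PySem.Set.ofList lst) (fun x => x) true

-- ===== PRECONDITION & SPEC =====
def Spec_sort_unique_descending (lst : List Int) (out : List Int) : Prop := out = sort_unique_descending_alt lst
instance (lst : List Int) (out : List Int) : Decidable (Spec_sort_unique_descending lst out) := by unfold Spec_sort_unique_descending; infer_instance

-- ===== CLAIM (what is proved, stated in full; the proofs are below) =====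
def Claim_equal_sort_unique_descending : Prop := ∀ (lst : List Int), Dom_sort_unique_descending lst → Spec_sort_unique_descending lst (sort_unique_descending lst)

-- ===== LEMMAS AND PROOFS =====

theorem mem_mergeA (l r : List Int) (x : Int) : x ∈ mergeA l r ↔ x ∈ l ∨ x ∈ r := by
  fun_induction mergeA l r with
  | case1 r => simp
  | case2 a l => simp
  | case3 a l b r h ih => simp [mergeA, h, ih]; tauto
  | case4 a l b r h ih => simp [mergeA, h, ih]; tauto

theorem pairwise_mergeA (l r : List Int)
    (hl : l.Pairwise (· ≥ ·)) (hr : r.Pairwise (· ≥ ·)) :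
    (mergeA l r).Pairwise (· ≥ ·) := by
  fun_induction mergeA l r with
  | case1 r => exact hr
  | case2 a l => exact hl
  | case3 a l b r h ih =>
      rw [List.pairwise_cons] at hl
      refine List.pairwise_cons.mpr ⟨?_, ih hl.2 hr⟩
      intro x hx
      rcases (mem_mergeA _ _ x).mp hx with hxl | hxr
      · exact hl.1 x hxl
      · rw [List.pairwise_cons] at hr
        rcases List.mem_cons.mp hxr with rfl | hxr'
        · exact le_of_lt h
        · exact le_trans (hr.1 x hxr') (le_of_lt h)
  | case4 a l b r h ih =>
      rw [List.pairwise_cons] at hr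
      refine List.pairwise_cons.mpr ⟨?_, ih hl hr.2⟩
      intro x hx
      rcases (mem_mergeA _ _ x).mp hx with hxl | hxr
      · rw [List.pairwise_cons] at hl
        rcases List.mem_cons.mp hxl with rfl | hxl'
        · omega
        · have := hl.1 x hxl'; omega
      · exact hr.1 x hxr

theorem removeDupAux_some_spec (xs : List Int) (m : Int)
    (hp : xs.Pairwise (· ≥ ·)) (hm : ∀ x ∈ xs, x ≤ m) :
    (removeDupAux (some m) xs).Pairwise (· > ·) ∧
    (∀ x ∈ removeDupAux (some m) xs, x < m) ∧
    (∀ x, x ∈ removeDupAux (some m) xs ↔ x ∈ xs ∧ x ≠ m) := by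
  induction xs generalizing m with
  | nil => simp [removeDupAux]
  | cons n rest ih =>
      rw [List.pairwise_cons] at hp
      have hrest : ∀ x ∈ rest, x ≤ n := fun x hx => hp.1 x hx
      have ihn := ih n hp.2 hrest
      by_cases hne : n = m
      · subst hne
        simp only [removeDupAux, ne_eq, not_true_eq_false, if_neg, decide_false,
          Bool.false_eq_true, if_false]
        refine ⟨ihn.1, ihn.2.1, fun x => ?_⟩
        rw [ihn.2.2 x]
        constructor
        · rintro ⟨hx, hxe⟩; exact ⟨List.mem_cons_of_mem _ hx, hxe⟩
        · rintro ⟨hx, hxe⟩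
          rcases List.mem_cons.mp hx with rfl | hx'
          · exact absurd rfl hxe
          · exact ⟨hx', hxe⟩
      · simp only [removeDupAux, hne, ne_eq, not_false_eq_true, decide_true, if_true]
        have hlt : ∀ x ∈ removeDupAux (some n) rest, x < n := ihn.2.1
        refine ⟨?_, ?_, ?_⟩
        · exact List.pairwise_cons.mpr ⟨hlt, ihn.1⟩
        · intro x hx
          rcases List.mem_cons.mp hx with rfl | hx'
          · exact lt_of_le_of_ne (hm x (List.mem_cons_self)) hne
          · have h1 := hlt x hx'
            have h2 := hm n List.mem_cons_self
            omega
        · intro x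
          constructor
          · intro hx
            rcases List.mem_cons.mp hx with rfl | hx'
            · exact ⟨List.mem_cons_self, hne⟩
            · have := (ihn.2.2 x).mp hx'
              have h1 := hlt x hx'
              have h2 := hm n List.mem_cons_self
              exact ⟨List.mem_cons_of_mem _ this.1, by omega⟩
          · rintro ⟨hx, hxe⟩
            rcases List.mem_cons.mp hx with rfl | hx'
            · exact List.mem_cons_self
            · by_cases hxn : x = n
              · subst hxn; exact List.mem_cons_self
              · exact List.mem_cons_of_mem _ ((ihn.2.2 x).mpr ⟨hx', hxn⟩)

theorem removeDuplicatesA_spec (xs : List Int) (hp : xs.Pairwise (· ≥ ·)) :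
    (removeDuplicatesA xs).Pairwise (· > ·) ∧
    (∀ x, x ∈ removeDuplicatesA xs ↔ x ∈ xs) := by
  cases xs with
  | nil => simp [removeDuplicatesA, removeDupAux]
  | cons n rest =>
      rw [List.pairwise_cons] at hp
      have h := removeDupAux_some_spec rest n hp.2 (fun x hx => hp.1 x hx)
      unfold removeDuplicatesA removeDupAux
      simp only [decide_true, if_true]
      constructor
      · exact List.pairwise_cons.mpr ⟨h.2.1, h.1⟩
      · intro x
        simp only [List.mem_cons]
        rw [h.2.2 x]
        constructor
        · rintro (rfl | ⟨hx, _⟩)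
          · exact Or.inl rfl
          · exact Or.inr hx
        · rintro (rfl | hx)
          · exact Or.inl rfl
          · by_cases hxn : x = n
            · exact Or.inl hxn
            · exact Or.inr ⟨hx, hxn⟩

theorem sort_unique_descending_char (lst : List Int) :
    (sort_unique_descending lst).Pairwise (· > ·) ∧
    (∀ x, x ∈ sort_unique_descending lst ↔ x ∈ lst) := by
  fun_induction sort_unique_descending lst with
  | case1 lst h => exact ⟨by interval_cases h : lst.length <;> simp_all [List.length_eq_one_iff] <;> aesop, fun x => Iff.rfl⟩
  | case2 lst h mid left right left_sorted right_sorted ihl ihr =>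
      have hlp : left_sorted.Pairwise (· ≥ ·) := ihl.1.imp (fun h => le_of_lt h)
      have hrp : right_sorted.Pairwise (· ≥ ·) := ihr.1.imp (fun h => le_of_lt h)
      have hmerge := pairwise_mergeA left_sorted right_sorted hlp hrp
      have hrd := removeDuplicatesA_spec _ hmerge
      refine ⟨hrd.1, fun x => ?_⟩
      rw [hrd.2 x, mem_mergeA, ihl.2 x, ihr.2 x]
      constructor
      · rintro (hx | hx)
        · exact List.mem_of_mem_take hx
        · exact List.mem_of_mem_drop hx
      · intro hx
        have : x ∈ left ++ right := by
          simp only [left, right, List.take_append_drop]; exact hx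
        rcases List.mem_append.mp this with hx' | hx'
        · exact Or.inl hx'
        · exact Or.inr hx'

-- ===== VERDICT (by name: the statement is the Claim_ definition above) =====
theorem sort_unique_descending_spec : Claim_equal_sort_unique_descending := by
  intro lst _
  unfold Spec_sort_unique_descending sort_unique_descending_alt
  have h := sort_unique_descending_char lst
  have hnd : (sort_unique_descending lst).Nodup :=
    h.1.imp fun hgt => ne_of_gt hgt
  have hperm : (sort_unique_descending lst).Perm (PySem.Set.ofList lst) := by
    rw [List.perm_ext_iff_of_nodup hnd (PySem.Set.nodup_ofList lst)]
    intro a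
    rw [h.2 a, PySem.Set.mem_ofList]
  exact (PySem.List.sorted_rev_eq_of_perm_of_pairwise_gt _ _ _ hperm h.1).symm
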